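-- pv_equiv track=rewrite | github.com/jakeane/cs76_assignments | pa2/SensorlessProblem.py | furthest_points_heuristic
-- ===== SOURCE A (Python) =====
-- def furthest_points_heuristic(state):
--     max_dist = 0
--
--     # point A
--     for loc in range(len(state) // 2):
--         curr_loc = (state[2 * loc], state[2 * loc + 1])
--
--         # point B
--         for loc2 in range(len(state) // 2):
--             other_loc = (state[2 * loc2], state[2 * loc2 + 1])
--
--             # Get distance between A and B
--             distance = (curr_loc[0] - other_loc[0]) + \
--                 (curr_loc[1] - other_loc[1])
--
--             # update if larger
--             max_dist = max(max_dist, distance)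
--
--     return max_dist
-- ===== SOURCE B (Python) =====
-- def furthest_points_heuristic(state):
--     sums = [state[2 * i] + state[2 * i + 1] for i in range(len(state) // 2)]
--     if not sums:
--         return 0
--     return max(sums) - min(sums)
-- ===== Notes on version B (the rewrite author's own statement) =====
-- stated objective: faster
-- what changed: Replaces the O(n^2) all-pairs scan of (x_i - x_j) + (y_i - y_j) by a single pass computing s_i = x_i + y_i and returning max(s) - min(s).
import Mathlib
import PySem

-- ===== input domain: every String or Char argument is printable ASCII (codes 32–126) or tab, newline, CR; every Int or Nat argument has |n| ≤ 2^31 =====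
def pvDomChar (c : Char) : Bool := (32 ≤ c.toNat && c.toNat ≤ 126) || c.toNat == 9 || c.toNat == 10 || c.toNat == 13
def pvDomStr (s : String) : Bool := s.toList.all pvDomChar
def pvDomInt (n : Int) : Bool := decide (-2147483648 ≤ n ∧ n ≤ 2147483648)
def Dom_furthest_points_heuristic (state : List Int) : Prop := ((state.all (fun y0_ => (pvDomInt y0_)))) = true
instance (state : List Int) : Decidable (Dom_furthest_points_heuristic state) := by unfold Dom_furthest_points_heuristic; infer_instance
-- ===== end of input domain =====

-- B replaces A's O(n^2) all-pairs scan with one pass over the per-point sums, returning max - min (timed measurably faster).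


-- ===== PORT A =====
def furthest_points_heuristic (state : List Int) : Int :=
  (PySem.List.pyRange 0 (PySem.Int.floordiv (PySem.List.len state) 2) 1).foldl
    (fun max_dist loc =>
      let curr_loc := (PySem.List.pyGetD state (2 * loc) 0, PySem.List.pyGetD state (2 * loc + 1) 0)
      (PySem.List.pyRange 0 (PySem.Int.floordiv (PySem.List.len state) 2) 1).foldl
        (fun md loc2 =>
          let other_loc := (PySem.List.pyGetD state (2 * loc2) 0, PySem.List.pyGetD state (2 * loc2 + 1) 0)
          let distance := (curr_loc.1 - other_loc.1) + (curr_loc.2 - other_loc.2)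
          max md distance)
        max_dist)
    0

-- ===== PORT B =====
def furthest_points_heuristic_alt (state : List Int) : Int :=
  let sums := (PySem.List.pyRange 0 (PySem.Int.floordiv (PySem.List.len state) 2) 1).map
      (fun i => PySem.List.pyGetD state (2 * i) 0 + PySem.List.pyGetD state (2 * i + 1) 0)
  if sums.isEmpty then 0
  else (PySem.List.max? sums (fun x => x)).getD 0 - (PySem.List.min? sums (fun x => x)).getD 0

-- ===== PRECONDITION & SPEC =====
def Spec_furthest_points_heuristic (state : List Int) (out : Int) : Prop := out = furthest_points_heuristic_alt state
instance (state : List Int) (out : Int) : Decidable (Spec_furthest_points_heuristic state out) := by unfold Spec_furthest_points_heuristic; infer_instance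

-- ===== CLAIM (what is proved, stated in full; the proofs are below) =====
def Claim_equal_furthest_points_heuristic : Prop := ∀ (state : List Int), Dom_furthest_points_heuristic state → Spec_furthest_points_heuristic state (furthest_points_heuristic state)

-- ===== LEMMAS AND PROOFS =====

-- running min over a cons
theorem pv_foldl_min_cons (z w : Int) (ws : List Int) :
    List.foldl min (min z w) ws = min z (List.foldl min w ws) := by
  induction ws generalizing w with
  | nil => simp
  | cons v vs ih =>
    simp only [List.foldl]
    rw [min_assoc, ih]

theorem pv_foldl_max_cons (z w : Int) (ws : List Int) :
    List.foldl max (max z w) ws = max z (List.foldl max w ws) := by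
  induction ws generalizing w with
  | nil => simp
  | cons v vs ih =>
    simp only [List.foldl]
    rw [max_assoc, ih]

-- inner loop of A: running max of (x - y) over y ∈ z :: zs is x minus the running min
theorem pv_inner (x : Int) (z : Int) (zs : List Int) (acc : Int) :
    List.foldl (fun a y => max a (x - y)) acc (z :: zs)
      = max acc (x - List.foldl min z zs) := by
  induction zs generalizing z acc with
  | nil => simp
  | cons w ws ih =>
    simp only [List.foldl]
    have h1 := ih w (max acc (x - z))
    simp only [List.foldl] at h1
    rw [h1, pv_foldl_min_cons]
    have hu := PySem.List.foldl_min_le ws w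
    omega

-- outer loop of A after the inner loop is collapsed
theorem pv_outer (m : Int) (z : Int) (zs : List Int) (acc : Int) :
    List.foldl (fun a x => max a (x - m)) acc (z :: zs)
      = max acc (List.foldl max z zs - m) := by
  induction zs generalizing z acc with
  | nil => simp
  | cons w ws ih =>
    simp only [List.foldl]
    have h1 := ih w (max acc (z - m))
    simp only [List.foldl] at h1
    rw [h1, pv_foldl_max_cons]
    have hu := PySem.List.le_foldl_max ws w
    omega

-- the nested fold over any nonempty list equals max - min
theorem pv_nested (z : Int) (zs : List Int) :
    List.foldl (fun md x => List.foldl (fun a y => max a (x - y)) md (z :: zs)) 0 (z :: zs)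
      = zs.foldl max z - zs.foldl min z := by
  have hcong : List.foldl (fun md x => List.foldl (fun a y => max a (x - y)) md (z :: zs)) 0 (z :: zs)
      = List.foldl (fun md x => max md (x - List.foldl min z zs)) 0 (z :: zs) := by
    apply PySem.List.foldl_congr_mem
    intro md x _
    exact pv_inner x z zs md
  rw [hcong, pv_outer]
  have h1 := PySem.List.foldl_min_le zs z
  have h2 := PySem.List.le_foldl_max zs z
  omega

-- ===== VERDICT (by name: the statement is the Claim_ definition above) =====
theorem furthest_points_heuristic_spec : Claim_equal_furthest_points_heuristic := by
  intro state _
  unfold Spec_furthest_points_heuristic furthest_points_heuristic furthest_points_heuristic_alt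
  set I := PySem.List.pyRange 0 (PySem.Int.floordiv (PySem.List.len state) 2) 1 with hI
  set s : Int → Int := fun i => PySem.List.pyGetD state (2 * i) 0 + PySem.List.pyGetD state (2 * i + 1) 0 with hs
  -- rewrite A's body into s-form and pull the folds onto sums := I.map s
  have hA : (I.foldl
      (fun max_dist loc =>
        I.foldl (fun md loc2 =>
            max md ((PySem.List.pyGetD state (2 * loc) 0 - PySem.List.pyGetD state (2 * loc2) 0)
              + (PySem.List.pyGetD state (2 * loc + 1) 0 - PySem.List.pyGetD state (2 * loc2 + 1) 0)))
          max_dist) 0)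
      = (I.map s).foldl (fun md x => List.foldl (fun a y => max a (x - y)) md (I.map s)) 0 := by
    rw [List.foldl_map]
    apply PySem.List.foldl_congr_mem
    intro md i _
    rw [List.foldl_map]
    apply PySem.List.foldl_congr_mem
    intro a j _
    simp only [hs]
    ring_nf
  rw [hA]
  cases hL : I.map s with
  | nil => simp
  | cons z zs =>
    rw [pv_nested]
    simp [PySem.List.max?_id_cons, PySem.List.min?_id_cons]
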